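-- pv_equiv track=rewrite | github.com/andyafter/defi-analysis | src/blockchain/data_fetcher.py | _calculate_liquidity_backwards
-- ===== SOURCE A (Python) =====
-- from typing import Dict, List, Any, Optional, Tuple
--
-- def _calculate_liquidity_backwards(
--                                  start_liquidity: int,
--                                  start_tick: int,
--                                  target_tick: int,
--                                  tick_spacing: int,
--                                  tick_data: Dict[int, Dict[str, int]]) -> int:
--     """
--     Calculate liquidity when walking backwards from start_tick to target_tick.
--
--     When moving backwards, we need to REVERSE the liquidity changes:
--     - If liquidity_net is positive at a tick, it means liquidity enters when
--       price crosses UP through that tick, so when going backwards (down),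
--       we need to subtract it.
--     """
--     liquidity = start_liquidity
--
--     # Walk backwards through ticks
--     for tick in range(start_tick, target_tick, -tick_spacing):
--         if tick in tick_data:
--             # Reverse the liquidity change
--             liquidity -= tick_data[tick]['liquidity_net']
--
--     return liquidity
-- ===== SOURCE B (Python) =====
-- def _calculate_liquidity_backwards(start_liquidity: int,
--                                    start_tick: int,
--                                    target_tick: int,
--                                    tick_spacing: int,
--                                    tick_data) -> int:
--     # Single pass over tick_data's entries: a tick contributes iff it lies in
--     # the walked range (range.__contains__ is an O(1) arithmetic test), rather
--     # than stepping through every tick of the range and probing the dict.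
--     rng = range(start_tick, target_tick, -tick_spacing)
--     return start_liquidity - sum(d['liquidity_net']
--                                  for tick, d in tick_data.items()
--                                  if tick in rng)
-- ===== Notes on version B (the rewrite author's own statement) =====
-- stated objective: alternative
-- what changed: Instead of stepping through every tick of range(start_tick, target_tick, -tick_spacing) and probing the dict at each step, B makes a single pass over tick_data's entries and sums those whose key lies in that range (O(1) arithmetic membership test); which of the two traversals is cheaper depends on the range length versus the dict size.
import Mathlib
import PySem

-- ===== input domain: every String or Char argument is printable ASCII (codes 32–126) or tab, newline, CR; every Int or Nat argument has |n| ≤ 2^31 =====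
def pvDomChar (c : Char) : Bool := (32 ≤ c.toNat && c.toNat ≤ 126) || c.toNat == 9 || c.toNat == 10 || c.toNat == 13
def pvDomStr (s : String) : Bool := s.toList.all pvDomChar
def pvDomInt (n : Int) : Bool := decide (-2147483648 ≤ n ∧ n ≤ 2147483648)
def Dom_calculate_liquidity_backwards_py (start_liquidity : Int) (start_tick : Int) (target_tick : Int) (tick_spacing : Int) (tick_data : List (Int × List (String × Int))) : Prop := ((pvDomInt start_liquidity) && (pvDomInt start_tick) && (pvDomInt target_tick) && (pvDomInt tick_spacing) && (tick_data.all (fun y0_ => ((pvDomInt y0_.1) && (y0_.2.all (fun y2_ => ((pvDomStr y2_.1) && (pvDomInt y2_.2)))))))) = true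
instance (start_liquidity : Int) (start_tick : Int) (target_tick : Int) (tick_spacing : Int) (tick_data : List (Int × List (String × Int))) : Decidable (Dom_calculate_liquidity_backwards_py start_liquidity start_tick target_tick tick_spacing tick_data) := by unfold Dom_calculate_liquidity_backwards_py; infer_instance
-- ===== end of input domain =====

-- B replaces A's walk over every tick of range(start_tick, target_tick, -tick_spacing)
-- (dict probe at each step) by a single pass over tick_data's entries, keeping those
-- whose key lies in that range (arithmetic membership test); objective: alternative.

-- ===== PORT A =====
-- loop 'for tick in range(start_tick, target_tick, -tick_spacing)' with
-- 'liquidity -= tick_data[tick]["liquidity_net"]' when tick is a key.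
-- tick_data[tick]['liquidity_net'] raises KeyError when the inner dict lacks the key;
-- Pre_ excludes that, so the port uses getD 0 there.
def calculate_liquidity_backwards_py (start_liquidity : Int) (start_tick : Int) (target_tick : Int) (tick_spacing : Int) (tick_data : List (Int × List (String × Int))) : Int :=
  (PySem.List.pyRange start_tick target_tick (-tick_spacing)).foldl
    (fun liquidity tick =>
      match (PySem.Dict.mk tick_data).get? tick with
      | some d => liquidity - (PySem.Dict.mk d).getD "liquidity_net" 0
      | none => liquidity)
    start_liquidity

-- ===== PORT B =====
-- Python's 't in range(a, b, step)': exact arithmetic test for step ≠ 0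
-- ((t - a) % step == 0 iff step ∣ (t - a), same in Python and with Int.emod).
def pvInRangeB (a : Int) (b : Int) (step : Int) (t : Int) : Bool :=
  if 0 < step then decide (a ≤ t ∧ t < b ∧ (t - a) % step = 0)
  else decide (b < t ∧ t ≤ a ∧ (t - a) % step = 0)

def calculate_liquidity_backwards_py_alt (start_liquidity : Int) (start_tick : Int) (target_tick : Int) (tick_spacing : Int) (tick_data : List (Int × List (String × Int))) : Int :=
  start_liquidity -
    ((tick_data.filter (fun p => pvInRangeB start_tick target_tick (-tick_spacing) p.1)).map
      (fun p => (PySem.Dict.mk p.2).getD "liquidity_net" 0)).sum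

-- ===== PRECONDITION & SPEC =====
-- Pre_ excludes exactly: tick_spacing = 0 (Python's range raises ValueError); an entry whose
-- tick is visited but whose dict lacks 'liquidity_net' (Python raises KeyError); and
-- association lists with duplicate tick keys, which no Python dict argument can denote.
def Pre_calculate_liquidity_backwards_py (start_liquidity : Int) (start_tick : Int) (target_tick : Int) (tick_spacing : Int) (tick_data : List (Int × List (String × Int))) : Prop :=
  tick_spacing ≠ 0 ∧ (tick_data.map Prod.fst).Nodup ∧
  ∀ p ∈ tick_data,
    ((if 0 < tick_spacing then target_tick < p.1 ∧ p.1 ≤ start_tick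
       else start_tick ≤ p.1 ∧ p.1 < target_tick) ∧
      (p.1 - start_tick) % tick_spacing = 0) →
    "liquidity_net" ∈ p.2.map Prod.fst
instance (start_liquidity : Int) (start_tick : Int) (target_tick : Int) (tick_spacing : Int) (tick_data : List (Int × List (String × Int))) : Decidable (Pre_calculate_liquidity_backwards_py start_liquidity start_tick target_tick tick_spacing tick_data) := by unfold Pre_calculate_liquidity_backwards_py; infer_instance

def pvWitness_calculate_liquidity_backwards_py : Int × Int × Int × Int × (List (Int × List (String × Int))) :=
  (100, 10, 0, 2, [(10, [("liquidity_net", 5)]), (4, [("liquidity_net", 7)]), (3, [])])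

def Spec_calculate_liquidity_backwards_py (start_liquidity : Int) (start_tick : Int) (target_tick : Int) (tick_spacing : Int) (tick_data : List (Int × List (String × Int))) (out : Int) : Prop := out = calculate_liquidity_backwards_py_alt start_liquidity start_tick target_tick tick_spacing tick_data
instance (start_liquidity : Int) (start_tick : Int) (target_tick : Int) (tick_spacing : Int) (tick_data : List (Int × List (String × Int))) (out : Int) : Decidable (Spec_calculate_liquidity_backwards_py start_liquidity start_tick target_tick tick_spacing tick_data out) := by unfold Spec_calculate_liquidity_backwards_py; infer_instance

-- ===== CLAIM (what is proved, stated in full; the proofs are below) =====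
def Claim_equal_calculate_liquidity_backwards_py : Prop := ∀ (start_liquidity : Int) (start_tick : Int) (target_tick : Int) (tick_spacing : Int) (tick_data : List (Int × List (String × Int))), Dom_calculate_liquidity_backwards_py start_liquidity start_tick target_tick tick_spacing tick_data → Pre_calculate_liquidity_backwards_py start_liquidity start_tick target_tick tick_spacing tick_data → Spec_calculate_liquidity_backwards_py start_liquidity start_tick target_tick tick_spacing tick_data (calculate_liquidity_backwards_py start_liquidity start_tick target_tick tick_spacing tick_data)

-- ===== LEMMAS AND PROOFS =====

theorem pvWitness_ok :
    Dom_calculate_liquidity_backwards_py (pvWitness_calculate_liquidity_backwards_py.1) (pvWitness_calculate_liquidity_backwards_py.2.1) (pvWitness_calculate_liquidity_backwards_py.2.2.1) (pvWitness_calculate_liquidity_backwards_py.2.2.2.1) (pvWitness_calculate_liquidity_backwards_py.2.2.2.2) ∧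
    Pre_calculate_liquidity_backwards_py (pvWitness_calculate_liquidity_backwards_py.1) (pvWitness_calculate_liquidity_backwards_py.2.1) (pvWitness_calculate_liquidity_backwards_py.2.2.1) (pvWitness_calculate_liquidity_backwards_py.2.2.2.1) (pvWitness_calculate_liquidity_backwards_py.2.2.2.2) := by
  decide

-- value A subtracts at a visited tick (0 when the tick is not a key)
def lookV (td : List (Int × List (String × Int))) (t : Int) : Int :=
  match (PySem.Dict.mk td).get? t with
  | some d => (PySem.Dict.mk d).getD "liquidity_net" 0
  | none => 0

def gV (p : Int × List (String × Int)) : Int := (PySem.Dict.mk p.2).getD "liquidity_net" 0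

theorem lookV_nil (t : Int) : lookV [] t = 0 := rfl

theorem lookV_cons (k : Int) (d : List (String × Int)) (rest : List (Int × List (String × Int))) (t : Int) :
    lookV ((k, d) :: rest) t = if k = t then gV (k, d) else lookV rest t := by
  simp [lookV, gV, PySem.Dict.get?_mk_cons]
  split_ifs with h
  · simp [h]
  · simp [h]

theorem lookV_eq_zero_of_not_mem (td : List (Int × List (String × Int))) (t : Int)
    (h : t ∉ td.map Prod.fst) : lookV td t = 0 := by
  induction td with
  | nil => rfl
  | cons p rest ih =>
    obtain ⟨k, d⟩ := p
    simp only [List.map_cons, List.mem_cons, not_or] at h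
    rw [lookV_cons, if_neg (fun hh => h.1 hh.symm), ih h.2]

theorem foldl_sub_eq (R : List Int) (f : Int → Int) (init : Int) :
    R.foldl (fun l t => l - f t) init = init - (R.map f).sum := by
  induction R generalizing init with
  | nil => simp
  | cons r R ih => simp [List.foldl_cons, ih]; ring

theorem sum_map_ite (k : Int) (c : Int) (h : Int → Int) (hk : h k = 0) :
    ∀ (R : List Int), R.Nodup →
      (R.map (fun t => if k = t then c else h t)).sum =
        (if k ∈ R then c else 0) + (R.map h).sum := by
  intro R
  induction R with
  | nil => simp
  | cons r R ih =>
    intro hnd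
    rw [List.nodup_cons] at hnd
    by_cases hkr : k = r
    · subst hkr
      have hcong : R.map (fun t => if k = t then c else h t) = R.map h :=
        List.map_congr_left (fun t ht => if_neg (fun he => hnd.1 (by rw [he]; exact ht)))
      rw [List.map_cons, List.sum_cons, if_pos rfl, hcong, if_pos (by simp),
        List.map_cons, List.sum_cons, hk]
      ring
    · rw [List.map_cons, List.sum_cons, if_neg hkr, ih hnd.2,
        List.map_cons, List.sum_cons]
      simp only [List.mem_cons, or_iff_right hkr]
      ring

theorem sum_R_lookV (R : List Int) (hR : R.Nodup) :
    ∀ (td : List (Int × List (String × Int))), (td.map Prod.fst).Nodup →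
      (R.map (lookV td)).sum =
        ((td.filter (fun p => decide (p.1 ∈ R))).map gV).sum := by
  intro td
  induction td with
  | nil =>
    intro _
    have h0 : R.map (lookV []) = R.map (fun _ => (0 : Int)) :=
      List.map_congr_left (fun t _ => lookV_nil t)
    simp [h0]
  | cons p rest ih =>
    intro hnd
    obtain ⟨k, d⟩ := p
    simp only [List.map_cons, List.nodup_cons] at hnd
    have hz : lookV rest k = 0 := lookV_eq_zero_of_not_mem rest k hnd.1
    have h1 : (R.map (lookV ((k, d) :: rest))).sum =
        (if k ∈ R then gV (k, d) else 0) + (R.map (lookV rest)).sum := by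
      have : R.map (lookV ((k, d) :: rest)) =
          R.map (fun t => if k = t then gV (k, d) else lookV rest t) := by
        apply List.map_congr_left; intro t _; exact lookV_cons k d rest t
      rw [this, sum_map_ite k (gV (k, d)) (lookV rest) hz R hR]
    rw [h1, ih hnd.2]
    by_cases hm : k ∈ R
    · simp [List.filter_cons, hm]
    · simp [List.filter_cons, hm]

theorem pyRange_neg_eq_map_neg (a b s : Int) :
    PySem.List.pyRange a b s = (PySem.List.pyRange (-a) (-b) (-s)).map (fun x => -x) := by
  unfold PySem.List.pyRange
  by_cases hs : s = 0
  · simp [hs]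
  · rw [if_neg hs, if_neg (by omega : ¬(-s = 0))]
    have hcount : (if 0 < s then if a < b then ((b - a + s - 1) / s).toNat else 0
        else if b < a then ((a - b + -s - 1) / -s).toNat else 0) =
        (if 0 < -s then if -a < -b then ((-b - -a + -s - 1) / -s).toNat else 0
        else if -b < -a then ((-a - -b + - -s - 1) / - -s).toNat else 0) := by
      have e1 : (-b - -a : Int) = a - b := by ring
      have e2 : (-a - -b : Int) = b - a := by ring
      split_ifs <;> first | omega | (simp only [neg_neg, e1, e2])
    rw [← hcount, List.map_map]
    apply List.map_congr_left
    intro k _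
    simp only [Function.comp]
    ring

theorem mem_pyRange_iff_of_neg {a b s : Int} (hs : s < 0) (x : Int) :
    x ∈ PySem.List.pyRange a b s ↔ b < x ∧ x ≤ a ∧ s ∣ x - a := by
  rw [pyRange_neg_eq_map_neg a b s]
  constructor
  · intro hx
    obtain ⟨y, hy, rfl⟩ := List.mem_map.mp hx
    rw [PySem.List.mem_pyRange_iff_of_pos (by omega : (0:Int) < -s) y] at hy
    refine ⟨by omega, by omega, ?_⟩
    obtain ⟨m, hm⟩ := hy.2.2
    exact ⟨m, by linarith⟩
  · rintro ⟨h1, h2, m, hm⟩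
    apply List.mem_map.mpr
    refine ⟨-x, ?_, by ring⟩
    rw [PySem.List.mem_pyRange_iff_of_pos (by omega : (0:Int) < -s) (-x)]
    exact ⟨by omega, by omega, ⟨m, by linarith⟩⟩

theorem mem_pyRange_iff_inRangeB {a b s : Int} (hs : s ≠ 0) (x : Int) :
    x ∈ PySem.List.pyRange a b s ↔ pvInRangeB a b s x = true := by
  unfold pvInRangeB
  rcases lt_trichotomy s 0 with h | h | h
  · rw [if_neg (by omega), mem_pyRange_iff_of_neg h x]
    simp only [decide_eq_true_eq]
    exact and_congr_right fun _ => and_congr_right fun _ =>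
      ⟨Int.emod_eq_zero_of_dvd, Int.dvd_of_emod_eq_zero⟩
  · omega
  · rw [if_pos h, PySem.List.mem_pyRange_iff_of_pos h x]
    simp only [decide_eq_true_eq]
    exact and_congr_right fun _ => and_congr_right fun _ =>
      ⟨Int.emod_eq_zero_of_dvd, Int.dvd_of_emod_eq_zero⟩

theorem nodup_pyRange {s : Int} (hs : s ≠ 0) (a b : Int) :
    (PySem.List.pyRange a b s).Nodup := by
  unfold PySem.List.pyRange
  rw [if_neg hs]
  apply List.Nodup.map _ List.nodup_range
  intro k1 k2 h
  have : s * (k1 : Int) = s * (k2 : Int) := by linarith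
  have := mul_left_cancel₀ hs this
  exact_mod_cast this

-- ===== VERDICT (by name: the statement is the Claim_ definition above) =====
theorem calculate_liquidity_backwards_py_spec : Claim_equal_calculate_liquidity_backwards_py := by
  intro sl st tt ts td _ hpre
  obtain ⟨hts, hnd, _⟩ := hpre
  unfold Spec_calculate_liquidity_backwards_py
  unfold calculate_liquidity_backwards_py calculate_liquidity_backwards_py_alt
  set R := PySem.List.pyRange st tt (-ts) with hRdef
  have hfold : R.foldl
      (fun liquidity tick =>
        match (PySem.Dict.mk td).get? tick with
        | some d => liquidity - (PySem.Dict.mk d).getD "liquidity_net" 0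
        | none => liquidity) sl = R.foldl (fun l t => l - lookV td t) sl := by
    congr 1
    funext l t
    unfold lookV
    rcases h : (PySem.Dict.mk td).get? t with _ | d <;> simp [h]
  rw [hfold, foldl_sub_eq,
    sum_R_lookV R (nodup_pyRange (by omega : -ts ≠ 0) st tt) td hnd]
  have hf : td.filter (fun p => decide (p.1 ∈ R)) =
      td.filter (fun p => pvInRangeB st tt (-ts) p.1) := by
    apply List.filter_congr
    intro p _
    rw [hRdef]
    simp [mem_pyRange_iff_inRangeB (by omega : -ts ≠ 0) p.1]
  rw [hf]
  rfl
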